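-- pv_equiv track=rewrite | github.com/joosep/adventofcode_2022 | day_08/day_08.py | row_trees_seen
-- ===== SOURCE A (Python) =====
-- def row_trees_seen(row, result_row):
--     for tree_ndx in range(0, len(row)):
--         seen = 0
--         for j in range(tree_ndx + 1, len(row)):
--             seen += 1
--             if row[tree_ndx] <= row[j]:
--                 break
--         result_row[tree_ndx] *= seen
--     return result_row
-- ===== SOURCE B (Python) =====
-- def row_trees_seen(row, result_row):
--     # One right-to-left pass with a monotonic stack of (height, index) of
--     # next >= candidates; mutates result_row in place like the original.
--     n = len(row)
--     stack = []
--     for i in range(n - 1, -1, -1):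
--         while stack and stack[-1][0] < row[i]:
--             stack.pop()
--         result_row[i] *= (stack[-1][1] - i) if stack else (n - 1 - i)
--         stack.append((row[i], i))
--     return result_row
-- ===== Notes on version B (the rewrite author's own statement) =====
-- stated objective: faster
-- what changed: Replaced the per-tree inner rightward scan by a single right-to-left pass maintaining a monotonic stack of next greater-or-equal candidates.
import Mathlib
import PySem

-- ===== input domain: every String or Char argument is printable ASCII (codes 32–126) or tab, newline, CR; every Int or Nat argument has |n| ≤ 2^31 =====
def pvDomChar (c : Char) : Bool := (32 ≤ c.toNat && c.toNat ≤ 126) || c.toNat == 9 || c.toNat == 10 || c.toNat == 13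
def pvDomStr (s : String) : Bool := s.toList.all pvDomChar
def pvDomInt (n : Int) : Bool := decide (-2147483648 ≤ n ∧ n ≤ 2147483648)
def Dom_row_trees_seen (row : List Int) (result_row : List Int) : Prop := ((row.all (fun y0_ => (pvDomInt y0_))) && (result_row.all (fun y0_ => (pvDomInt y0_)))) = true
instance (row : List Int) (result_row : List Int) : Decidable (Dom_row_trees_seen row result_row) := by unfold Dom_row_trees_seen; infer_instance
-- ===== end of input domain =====

-- B replaces A's quadratic per-tree rightward scan by one right-to-left pass with a
-- monotonic stack (faster, asymptotic). Both Pythons mutate result_row in place and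
-- return it; the equivalence proved here is about the return value.

-- ===== PORT A =====
-- A's inner loop: walk right from the tree, counting, stop at the first tree ≥ it.
def rtsSeenA (v : Int) (rest : List Int) : Int :=
  match rest with
  | [] => 0
  | x :: xs => if v ≤ x then 1 else 1 + rtsSeenA v xs

-- A's outer loop over tree_ndx, multiplying result_row[tree_ndx] in place;
-- entries of result_row beyond row's length are returned unchanged.
def rtsGoA (rowSuffix : List Int) (resSuffix : List Int) : List Int :=
  match rowSuffix, resSuffix with
  | [], res => res
  | _ :: _, [] => []        -- Python raises IndexError here; outside Pre_
  | v :: vs, r :: rs => (r * rtsSeenA v vs) :: rtsGoA vs rs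

def row_trees_seen (row : List Int) (result_row : List Int) : List Int :=
  rtsGoA row result_row

-- ===== PORT B =====
-- while stack and stack[-1][0] < row[i]: stack.pop()
def rtsPop (v : Int) (st : List (Int × Int)) : List (Int × Int) :=
  match st with
  | [] => []
  | (h, j) :: rest => if h < v then rtsPop v rest else (h, j) :: rest

-- Source B's loop runs i from n-1 down to 0; here each element's step runs after the
-- recursive call on its tail, i.e. right-to-left, threading (result, stack).
def rtsGoB (rowSuffix : List Int) (resSuffix : List Int) (i : Int) :
    List Int × List (Int × Int) :=
  match rowSuffix, resSuffix with
  | [], res => (res, [])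
  | _ :: _, [] => ([], []) -- Python raises IndexError; outside Pre_
  | v :: vs, r :: rs =>
      let (res', st) := rtsGoB vs rs (i + 1)
      let st' := rtsPop v st
      let seen : Int :=
        match st' with
        | (_, j) :: _ => j - i
        | [] => (vs.length : Int)       -- n - 1 - i = number of trees to the right
      ((r * seen) :: res', (v, i) :: st')

def row_trees_seen_alt (row : List Int) (result_row : List Int) : List Int :=
  (rtsGoB row result_row 0).1

-- ===== PRECONDITION & SPEC =====
-- Pre_ excludes result_row shorter than row, on which both Pythons raise IndexError.
def Pre_row_trees_seen (row : List Int) (result_row : List Int) : Prop :=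
  row.length ≤ result_row.length
instance (row : List Int) (result_row : List Int) : Decidable (Pre_row_trees_seen row result_row) := by unfold Pre_row_trees_seen; infer_instance
def pvWitness_row_trees_seen : List Int × List Int := ([3, 1, 2, 2], [1, 1, 1, 1])

def Spec_row_trees_seen (row : List Int) (result_row : List Int) (out : List Int) : Prop := out = row_trees_seen_alt row result_row
instance (row : List Int) (result_row : List Int) (out : List Int) : Decidable (Spec_row_trees_seen row result_row out) := by unfold Spec_row_trees_seen; infer_instance

-- ===== CLAIM (what is proved, stated in full; the proofs are below) =====
def Claim_equal_row_trees_seen : Prop := ∀ (row : List Int) (result_row : List Int), Dom_row_trees_seen row result_row → Pre_row_trees_seen row result_row → Spec_row_trees_seen row result_row (row_trees_seen row result_row)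

-- ===== LEMMAS AND PROOFS =====

-- The stack rtsGoB returns depends only on the row suffix and the base index.
def rtsStackOf (vs : List Int) (b : Int) : List (Int × Int) :=
  match vs with
  | [] => []
  | x :: xs => (x, b) :: rtsPop x (rtsStackOf xs (b + 1))

theorem rtsGoB_snd (vs : List Int) (rs : List Int) (b : Int)
    (h : vs.length ≤ rs.length) : (rtsGoB vs rs b).2 = rtsStackOf vs b := by
  induction vs generalizing rs b with
  | nil => simp [rtsGoB, rtsStackOf]
  | cons x xs ih =>
      cases rs with
      | nil => simp at h
      | cons r rs' =>
          simp only [List.length_cons, Nat.add_le_add_iff_right] at h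
          simp [rtsGoB, rtsStackOf, ih rs' (b + 1) h]

theorem rtsPop_pop (v x : Int) (hx : x ≤ v) (st : List (Int × Int)) :
    rtsPop v (rtsPop x st) = rtsPop v st := by
  induction st with
  | nil => simp [rtsPop]
  | cons p rest ih =>
      obtain ⟨h, j⟩ := p
      by_cases hh : h < x
      · have : h < v := lt_of_lt_of_le hh hx
        simp [rtsPop, hh, this, ih]
      · simp [rtsPop, hh]

-- The stack built from vs (first element at index b+1), queried for a value v at
-- index b, yields exactly A's seen count for that value.
theorem rtsStack_seen (vs : List Int) (b : Int) (v : Int) :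
    (match rtsPop v (rtsStackOf vs (b + 1)) with
      | (_, j) :: _ => j - b
      | [] => (vs.length : Int)) = rtsSeenA v vs := by
  induction vs generalizing b with
  | nil => simp [rtsStackOf, rtsPop, rtsSeenA]
  | cons x xs ih =>
      by_cases hxv : x < v
      · have hle : x ≤ v := le_of_lt hxv
        have hrec := ih (b + 1)
        simp only [rtsStackOf, rtsPop, hxv, if_true, rtsPop_pop v x hle,
          rtsSeenA, if_neg (not_le.mpr hxv)]
        cases hst : rtsPop v (rtsStackOf xs (b + 1 + 1)) with
        | nil =>
            rw [hst] at hrec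
            simp only [List.length_cons] at hrec ⊢
            push_cast at hrec ⊢
            rw [← hrec]; ring
        | cons p rest =>
            obtain ⟨h, j⟩ := p
            rw [hst] at hrec
            rw [← hrec]; ring
      · have hvx : v ≤ x := le_of_not_gt hxv
        simp only [rtsStackOf, rtsPop, hxv, if_false, rtsSeenA, if_pos hvx]
        ring

theorem rtsGoB_fst (vs : List Int) (rs : List Int) (b : Int)
    (h : vs.length ≤ rs.length) : (rtsGoB vs rs b).1 = rtsGoA vs rs := by
  induction vs generalizing rs b with
  | nil => simp [rtsGoB, rtsGoA]
  | cons x xs ih =>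
      cases rs with
      | nil => simp at h
      | cons r rs' =>
          simp only [List.length_cons, Nat.add_le_add_iff_right] at h
          have hsnd := rtsGoB_snd xs rs' (b + 1) h
          have hseen := rtsStack_seen xs b x
          simp only [rtsGoB, rtsGoA]
          rw [show (rtsGoB xs rs' (b + 1)) = ((rtsGoB xs rs' (b+1)).1, (rtsGoB xs rs' (b+1)).2) from rfl]
          simp only [hsnd, ih rs' (b + 1) h]
          rw [← hseen]

-- ===== VERDICT (by name: the statement is the Claim_ definition above) =====
theorem row_trees_seen_spec : Claim_equal_row_trees_seen := by
  intro row result_row _ hpre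
  unfold Spec_row_trees_seen row_trees_seen row_trees_seen_alt
  exact (rtsGoB_fst row result_row 0 hpre).symm
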